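-- pv_equiv track=rewrite | github.com/JianxiangWang/BaiduIntern | exercise/spoSentCount.py | remove_flanking_symbols
-- ===== SOURCE A (Python) =====
-- def remove_flanking_symbols(string, symbols):
--     i = 0
--     while i < len(string) and (string[i] in symbols):
--         i += 1
--     if i == len(string):
--         return ""
--
--     j = len(string) - 1
--     while j >= 0 and (string[j] in symbols):
--         j -= 1
--     return string[i: j + 1]
-- ===== SOURCE B (Python) =====
-- def remove_flanking_symbols(string, symbols):
--     idx = [k for k, c in enumerate(string) if c not in symbols]
--     if not idx:
--         return ""
--     return string[idx[0]: idx[-1] + 1]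
-- ===== Notes on version B (the rewrite author's own statement) =====
-- stated objective: simpler
-- what changed: Replaces the two early-stopping boundary scans (forward for the first non-symbol, backward for the last) by one full pass that collects all non-symbol indices and slices between the first and the last.
import Mathlib
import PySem

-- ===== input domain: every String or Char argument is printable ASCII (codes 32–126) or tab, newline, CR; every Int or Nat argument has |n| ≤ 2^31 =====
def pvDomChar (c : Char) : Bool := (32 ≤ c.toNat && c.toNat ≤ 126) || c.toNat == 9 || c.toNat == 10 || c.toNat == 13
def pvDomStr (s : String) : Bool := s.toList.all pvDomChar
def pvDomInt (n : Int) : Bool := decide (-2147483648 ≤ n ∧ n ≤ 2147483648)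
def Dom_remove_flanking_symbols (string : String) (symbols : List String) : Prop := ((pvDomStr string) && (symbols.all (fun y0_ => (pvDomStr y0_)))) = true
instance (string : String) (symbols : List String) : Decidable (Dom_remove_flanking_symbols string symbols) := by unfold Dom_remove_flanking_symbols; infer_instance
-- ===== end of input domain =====

-- B replaces A's two early-stopping boundary scans by one full pass collecting the
-- non-symbol indices, then slices between the first and the last (objective: simpler).

-- ===== PORT A =====
-- A's forward scan: 'i = 0; while i < len(string) and string[i] in symbols: i += 1'.
-- A's backward scan is the same early-stopping loop over the reversed characters
-- (the final j of the Python loop is len-1-count, an Int as in Python).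
def rfsScan (symbols : List String) : List Char → Nat
  | [] => 0
  | c :: rest => if String.ofList [c] ∈ symbols then rfsScan symbols rest + 1 else 0

def remove_flanking_symbols (string : String) (symbols : List String) : String :=
  let cs := string.toList
  let i := rfsScan symbols cs
  if i = cs.length then ""
  else
    let j : Int := (cs.length : Int) - 1 - (rfsScan symbols cs.reverse : Int)
    String.ofList (PySem.List.slice cs (some (i : Int)) (some (j + 1)))

-- ===== PORT B =====
-- idx = [k for k, c in enumerate(string) if c not in symbols]; if empty return "",
-- else string[idx[0] : idx[-1] + 1].
def remove_flanking_symbols_alt (string : String) (symbols : List String) : String :=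
  let cs := string.toList
  let idx := (PySem.List.enumerate cs 0).filterMap
      (fun p => if String.ofList [p.2] ∈ symbols then none else some p.1)
  if h : idx = [] then ""
  else String.ofList (PySem.List.slice cs (some (idx.head h)) (some (idx.getLast h + 1)))

-- ===== PRECONDITION & SPEC =====
def Spec_remove_flanking_symbols (string : String) (symbols : List String) (out : String) : Prop := out = remove_flanking_symbols_alt string symbols
instance (string : String) (symbols : List String) (out : String) : Decidable (Spec_remove_flanking_symbols string symbols out) := by unfold Spec_remove_flanking_symbols; infer_instance

-- ===== CLAIM (what is proved, stated in full; the proofs are below) =====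
def Claim_equal_remove_flanking_symbols : Prop := ∀ (string : String) (symbols : List String), Dom_remove_flanking_symbols string symbols → Spec_remove_flanking_symbols string symbols (remove_flanking_symbols string symbols)

-- ===== LEMMAS AND PROOFS =====

theorem rfsScan_le (symbols : List String) (cs : List Char) : rfsScan symbols cs ≤ cs.length := by
  induction cs with
  | nil => simp [rfsScan]
  | cons c rest ih => simp only [rfsScan, List.length_cons]; split <;> omega

theorem rfsScan_eq_len_iff (symbols : List String) (cs : List Char) :
    rfsScan symbols cs = cs.length ↔ ∀ c ∈ cs, String.ofList [c] ∈ symbols := by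
  induction cs with
  | nil => simp [rfsScan]
  | cons c rest ih =>
    by_cases h : String.ofList [c] ∈ symbols
    · simp only [rfsScan, if_pos h, List.length_cons, List.mem_cons, forall_eq_or_imp]
      constructor
      · intro he; exact ⟨h, ih.mp (by omega)⟩
      · intro ⟨_, ha⟩; have := ih.mpr ha; omega
    · have hle := rfsScan_le symbols rest
      simp only [rfsScan, if_neg h, List.length_cons, List.mem_cons, forall_eq_or_imp]
      constructor
      · intro he; omega
      · intro ⟨hc, _⟩; exact absurd hc h

theorem rfsScan_lt (symbols : List String) (cs : List Char)
    (hx : ∃ c ∈ cs, String.ofList [c] ∉ symbols) :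
    rfsScan symbols cs < cs.length := by
  have hle := rfsScan_le symbols cs
  rcases Nat.lt_or_ge (rfsScan symbols cs) cs.length with h | h
  · exact h
  · exfalso
    rcases hx with ⟨c, hm, hn⟩
    exact hn ((rfsScan_eq_len_iff symbols cs).mp (le_antisymm hle h) c hm)

theorem rfsScan_append_of_ex (symbols : List String) (xs ys : List Char)
    (hx : ∃ c ∈ xs, String.ofList [c] ∉ symbols) :
    rfsScan symbols (xs ++ ys) = rfsScan symbols xs := by
  induction xs with
  | nil => simp at hx
  | cons c rest ih =>
    by_cases h : String.ofList [c] ∈ symbols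
    · have hx' : ∃ x ∈ rest, String.ofList [x] ∉ symbols := by
        rcases hx with ⟨x, hm, hnx⟩
        rcases List.mem_cons.mp hm with rfl | hm'
        · exact absurd h hnx
        · exact ⟨x, hm', hnx⟩
      simp only [List.cons_append, rfsScan, if_pos h, ih hx']
    · simp only [List.cons_append, rfsScan, if_neg h]

theorem rfsScan_append_of_all (symbols : List String) (xs ys : List Char)
    (hall : ∀ c ∈ xs, String.ofList [c] ∈ symbols) :
    rfsScan symbols (xs ++ ys) = xs.length + rfsScan symbols ys := by
  induction xs with
  | nil => simp
  | cons c rest ih =>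
    simp only [List.cons_append, rfsScan, List.length_cons,
      if_pos (hall c (by simp)), ih (fun x hx => hall x (by simp [hx]))]
    omega

theorem rfsIdx_eq_nil_iff (symbols : List String) (cs : List Char) (s : Int) :
    (PySem.List.enumerate cs s).filterMap
      (fun p => if String.ofList [p.2] ∈ symbols then none else some p.1) = []
    ↔ ∀ c ∈ cs, String.ofList [c] ∈ symbols := by
  induction cs generalizing s with
  | nil => simp [PySem.List.enumerate_nil]
  | cons c rest ih =>
    rw [PySem.List.enumerate_cons]
    by_cases h : String.ofList [c] ∈ symbols
    · rw [List.filterMap_cons_none (by simp [h])]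
      rw [ih (s := s + 1)]
      simp [h]
    · rw [List.filterMap_cons_some (b := s) (by simp [h])]
      simp [h]

theorem rfsIdx_head (symbols : List String) (cs : List Char) (s : Int)
    (hx : ∃ c ∈ cs, String.ofList [c] ∉ symbols) :
    ((PySem.List.enumerate cs s).filterMap
      (fun p => if String.ofList [p.2] ∈ symbols then none else some p.1)).head?
    = some (s + (rfsScan symbols cs : Int)) := by
  induction cs generalizing s with
  | nil => simp at hx
  | cons c rest ih =>
    rw [PySem.List.enumerate_cons]
    by_cases h : String.ofList [c] ∈ symbols
    · have hx' : ∃ x ∈ rest, String.ofList [x] ∉ symbols := by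
        rcases hx with ⟨x, hm, hnx⟩
        rcases List.mem_cons.mp hm with rfl | hm'
        · exact absurd h hnx
        · exact ⟨x, hm', hnx⟩
      rw [List.filterMap_cons_none (by simp [h]), ih (s := s + 1) hx']
      simp only [rfsScan, if_pos h]
      congr 1
      push_cast
      ring
    · rw [List.filterMap_cons_some (b := s) (by simp [h])]
      simp [rfsScan, if_neg h]

theorem rfsIdx_last (symbols : List String) (cs : List Char) (s : Int)
    (hx : ∃ c ∈ cs, String.ofList [c] ∉ symbols) :
    ((PySem.List.enumerate cs s).filterMap
      (fun p => if String.ofList [p.2] ∈ symbols then none else some p.1)).getLast?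
    = some (s + ((cs.length - 1 - rfsScan symbols cs.reverse : Nat) : Int)) := by
  induction cs generalizing s with
  | nil => simp at hx
  | cons c rest ih =>
    rw [PySem.List.enumerate_cons]
    by_cases hall : ∀ x ∈ rest, String.ofList [x] ∈ symbols
    · -- the witness must be c itself
      have hnil : (PySem.List.enumerate rest (s+1)).filterMap
          (fun p => if String.ofList [p.2] ∈ symbols then none else some p.1) = [] :=
        (rfsIdx_eq_nil_iff symbols rest (s+1)).mpr hall
      have hc : String.ofList [c] ∉ symbols := by
        rcases hx with ⟨x, hm, hn⟩
        rcases List.mem_cons.mp hm with rfl | hm'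
        · exact hn
        · exact absurd (hall x hm') hn
      rw [List.filterMap_cons_some (b := s) (by simp [hc]), hnil]
      have htr : rfsScan symbols (c :: rest).reverse = rest.length := by
        have hrv : (c :: rest).reverse = rest.reverse ++ [c] := by simp
        rw [hrv, rfsScan_append_of_all symbols rest.reverse [c]
              (fun x hxm => hall x (by simpa using hxm))]
        simp [rfsScan, hc]
      rw [htr]
      simp
    · push_neg at hall
      have hx' : ∃ x ∈ rest, String.ofList [x] ∉ symbols := hall
      have hrec := ih (s := s + 1) hx'
      have hxr : ∃ x ∈ rest.reverse, String.ofList [x] ∉ symbols := by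
        rcases hx' with ⟨x, hm, hn⟩; exact ⟨x, by simpa using hm, hn⟩
      have htr : rfsScan symbols (c :: rest).reverse = rfsScan symbols rest.reverse := by
        have hrv : (c :: rest).reverse = rest.reverse ++ [c] := by simp
        rw [hrv]
        exact rfsScan_append_of_ex symbols rest.reverse [c] hxr
      have hlt : rfsScan symbols rest.reverse < rest.length := by
        have := rfsScan_lt symbols rest.reverse hxr
        simpa using this
      by_cases h : String.ofList [c] ∈ symbols
      · rw [List.filterMap_cons_none (by simp [h]), hrec, htr]
        congr 1
        simp only [List.length_cons]
        omega
      · rw [List.filterMap_cons_some (b := s) (by simp [h]), List.getLast?_cons, hrec]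
        simp only [Option.getD_some, Option.some.injEq]
        rw [htr]
        simp only [List.length_cons]
        omega

-- ===== VERDICT (by name: the statement is the Claim_ definition above) =====
theorem remove_flanking_symbols_spec : Claim_equal_remove_flanking_symbols := by
  intro string symbols _
  unfold Spec_remove_flanking_symbols remove_flanking_symbols remove_flanking_symbols_alt
  set cs := string.toList with hcs
  by_cases hi : rfsScan symbols cs = cs.length
  · have hall := (rfsScan_eq_len_iff symbols cs).mp hi
    have hnil : (PySem.List.enumerate cs 0).filterMap
        (fun p => if String.ofList [p.2] ∈ symbols then none else some p.1) = [] :=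
      (rfsIdx_eq_nil_iff symbols cs 0).mpr hall
    simp [hi, hnil]
  · have hx : ∃ c ∈ cs, String.ofList [c] ∉ symbols := by
      by_contra hc; push_neg at hc
      exact hi ((rfsScan_eq_len_iff symbols cs).mpr hc)
    have hhead := rfsIdx_head symbols cs 0 hx
    have hlast := rfsIdx_last symbols cs 0 hx
    have hne : (PySem.List.enumerate cs 0).filterMap
        (fun p => if String.ofList [p.2] ∈ symbols then none else some p.1) ≠ [] := by
      intro hz
      rcases hx with ⟨c, hm, hn⟩
      exact hn ((rfsIdx_eq_nil_iff symbols cs 0).mp hz c hm)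
    have htlt : rfsScan symbols cs.reverse < cs.length := by
      have := rfsScan_lt symbols cs.reverse
        (by rcases hx with ⟨x, hm, hn⟩; exact ⟨x, by simpa using hm, hn⟩)
      simpa using this
    rw [if_neg hi, dif_neg hne]
    have h1 : ((PySem.List.enumerate cs 0).filterMap
        (fun p => if String.ofList [p.2] ∈ symbols then none else some p.1)).head hne
        = (rfsScan symbols cs : Int) := by
      rw [List.head?_eq_some_head hne] at hhead
      have := Option.some.inj hhead
      omega
    have h2 : ((PySem.List.enumerate cs 0).filterMap
        (fun p => if String.ofList [p.2] ∈ symbols then none else some p.1)).getLast hne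
        = ((cs.length : Int) - 1 - (rfsScan symbols cs.reverse : Int)) := by
      rw [List.getLast?_eq_some_getLast hne] at hlast
      have := Option.some.inj hlast
      omega
    rw [h1, h2]
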